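-- pv_equiv track=rewrite | github.com/wpowen/bestseller | src/bestseller/services/chapter_validator.py | _first_group_hit
-- ===== SOURCE A (Python) =====
-- def _first_group_hit(
--     text: str,
--     groups: dict[str, tuple[str, ...]],
-- ) -> str | None:
--     for group, needles in groups.items():
--         if any(needle in text for needle in needles):
--             return group
--     return None
-- ===== SOURCE B (Python) =====
-- def _first_group_hit(
--     text: str,
--     groups: dict[str, tuple[str, ...]],
-- ) -> str | None:
--     # Precompute a hash set of every substring of text whose length is a needle
--     # length; each needle test then becomes one set lookup instead of a scan.
--     lengths = {len(n) for ns in groups.values() for n in ns}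
--     subs = {text[i:i + L] for L in lengths for i in range(len(text) - L + 1)}
--     for group, needles in groups.items():
--         for n in needles:
--             if n in subs:
--                 return group
--     return None
-- ===== Notes on version B (the rewrite author's own statement) =====
-- stated objective: alternative
-- what changed: B precomputes one hash set of all substrings of text whose lengths occur among the needles, then replaces every per-needle substring scan of text by a single O(1) set-membership lookup.
import Mathlib
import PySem

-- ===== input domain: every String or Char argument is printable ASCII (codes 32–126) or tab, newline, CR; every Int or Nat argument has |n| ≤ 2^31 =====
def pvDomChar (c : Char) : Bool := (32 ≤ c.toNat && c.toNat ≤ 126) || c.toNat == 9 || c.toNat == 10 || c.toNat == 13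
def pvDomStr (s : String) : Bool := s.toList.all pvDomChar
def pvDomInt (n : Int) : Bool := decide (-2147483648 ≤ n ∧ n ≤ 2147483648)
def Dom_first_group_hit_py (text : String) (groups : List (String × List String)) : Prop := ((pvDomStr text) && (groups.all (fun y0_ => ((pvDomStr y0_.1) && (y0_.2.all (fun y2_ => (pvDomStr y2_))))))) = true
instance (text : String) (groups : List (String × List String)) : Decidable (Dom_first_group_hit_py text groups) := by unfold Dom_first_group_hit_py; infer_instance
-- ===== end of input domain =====

-- B replaces A's per-needle substring scans of text by a precomputed hash set of
-- all substrings of text with needle lengths, queried by one set lookup per needle.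

-- ===== PORT A =====
-- A's 'for group, needles in groups.items(): if any(needle in text ...): return group'
def pvScanA (text : String) : List (String × List String) → Option String
  | [] => none
  | (g, ns) :: rest =>
    if ns.any (fun n => PySem.Str.isIn n text) then some g else pvScanA text rest

def first_group_hit_py (text : String) (groups : List (String × List String)) : Option String :=
  pvScanA text groups

-- ===== PORT B =====
-- lengths = {len(n) for ns in groups.values() for n in ns}
def pvLens (groups : List (String × List String)) : PySem.Set Int :=
  PySem.Set.ofList ((groups.flatMap (fun p => p.2)).map (fun n => PySem.Str.len n))

-- subs = {text[i:i+L] for L in lengths for i in range(len(text) - L + 1)}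
def pvSubs (text : String) (lens : PySem.Set Int) : PySem.Set String :=
  PySem.Set.ofList (lens.flatMap (fun L =>
    (PySem.List.pyRange 0 (PySem.Str.len text - L + 1) 1).map
      (fun i => PySem.Str.slice text (some i) (some (i + L)))))

-- for group, needles in groups.items(): for n in needles: if n in subs: return group
def pvScanB (subs : PySem.Set String) : List (String × List String) → Option String
  | [] => none
  | (g, ns) :: rest =>
    if ns.any (fun n => PySem.Set.contains subs n) then some g else pvScanB subs rest

def first_group_hit_py_alt (text : String) (groups : List (String × List String)) : Option String :=
  pvScanB (pvSubs text (pvLens groups)) groups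

-- ===== PRECONDITION & SPEC =====
def Spec_first_group_hit_py (text : String) (groups : List (String × List String)) (out : Option String) : Prop := out = first_group_hit_py_alt text groups
instance (text : String) (groups : List (String × List String)) (out : Option String) : Decidable (Spec_first_group_hit_py text groups out) := by unfold Spec_first_group_hit_py; infer_instance

-- ===== CLAIM (what is proved, stated in full; the proofs are below) =====
def Claim_equal_first_group_hit_py : Prop := ∀ (text : String) (groups : List (String × List String)), Dom_first_group_hit_py text groups → Spec_first_group_hit_py text groups (first_group_hit_py text groups)

-- ===== LEMMAS AND PROOFS =====

-- every Python slice of a list is an infix of it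
lemma pv_slice_infix {α : Type} (xs : List α) (a b : Option Int) :
    PySem.List.slice xs a b <:+: xs := by
  cases a <;> cases b <;> simp [PySem.List.slice] <;>
    first
      | exact List.infix_refl _
      | exact (List.take_prefix _ _).isInfix
      | exact (List.drop_suffix _ _).isInfix
      | exact ((List.take_prefix _ _).isInfix).trans (List.drop_suffix _ _).isInfix

-- membership in B's substring set agrees with Python's 'n in text'
-- for every needle whose length is in the length set
lemma pv_contains_subs (text : String) (lens : PySem.Set Int) (n : String)
    (hn : PySem.Str.len n ∈ lens) :
    PySem.Set.contains (pvSubs text lens) n = PySem.Str.isIn n text := by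
  rw [Bool.eq_iff_iff, PySem.Set.contains_iff, PySem.Str.isIn_iff_infix]
  unfold pvSubs
  rw [PySem.Set.mem_ofList]
  constructor
  · rintro h
    rw [List.mem_flatMap] at h
    obtain ⟨L, _, hmem⟩ := h
    rw [List.mem_map] at hmem
    obtain ⟨i, _, hslice⟩ := hmem
    have : n.toList = PySem.List.slice text.toList (some i) (some (i + L)) := by
      rw [← hslice]; simp [PySem.Str.slice]
    rw [this]
    exact pv_slice_infix _ _ _
  · rintro ⟨t, u, hs⟩
    rw [List.mem_flatMap]
    refine ⟨PySem.Str.len n, hn, ?_⟩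
    rw [List.mem_map]
    refine ⟨(t.length : Int), ?_, ?_⟩
    · rw [PySem.List.mem_pyRange_one]
      have hlen : text.toList.length = t.length + n.toList.length + u.length := by
        rw [← hs]; simp; omega
      rw [PySem.Str.len_eq, PySem.Str.len_eq]
      constructor
      · positivity
      · omega
    · apply String.toList_inj.mp
      have hL : PySem.Str.len n = (n.toList.length : Int) := PySem.Str.len_eq n
      rw [hL]
      have : (PySem.Str.slice text (some (t.length : Int))
          (some ((t.length : Int) + (n.toList.length : Int)))).toList
          = PySem.List.slice text.toList (some (t.length : Int))
            (some ((t.length : Int) + (n.toList.length : Int))) := by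
        simp [PySem.Str.slice]
      rw [this, PySem.List.slice_natCast_add, ← hs]
      rw [List.append_assoc, List.drop_left, List.take_left]

-- the two scans agree whenever set lookup agrees with 'in text' on every needle
lemma pv_scan_eq (text : String) (subs : PySem.Set String)
    (gs : List (String × List String))
    (h : ∀ p ∈ gs, ∀ n ∈ p.2, PySem.Set.contains subs n = PySem.Str.isIn n text) :
    pvScanB subs gs = pvScanA text gs := by
  induction gs with
  | nil => rfl
  | cons p rest ih =>
    obtain ⟨g, ns⟩ := p
    simp only [pvScanA, pvScanB]
    rw [PySem.List.any_congr_mem (fun n hn => h (g, ns) List.mem_cons_self n hn)]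
    rw [ih (fun q hq n hn => h q (List.mem_cons_of_mem _ hq) n hn)]

-- ===== VERDICT (by name: the statement is the Claim_ definition above) =====
theorem first_group_hit_py_spec : Claim_equal_first_group_hit_py := by
  intro text groups _
  unfold Spec_first_group_hit_py first_group_hit_py first_group_hit_py_alt
  refine (pv_scan_eq text _ groups ?_).symm
  intro p hp n hn
  apply pv_contains_subs
  unfold pvLens
  rw [PySem.Set.mem_ofList, List.mem_map]
  exact ⟨n, List.mem_flatMap.mpr ⟨p, hp, hn⟩, rfl⟩
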